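-- pv_equiv track=rewrite | github.com/marcotran/pyurgent | languageprocess.py | delElementsFromBlackList
-- ===== SOURCE A (Python) =====
-- def delElementsFromBlackList(item_list,black_list):
--     n = item_list
--     for x in black_list:
--         while 1==1:
--             try:
--                 n.remove(x)
--             except:
--                 break
--     return n
-- ===== SOURCE B (Python) =====
-- def delElementsFromBlackList(item_list, black_list):
--     banned = set(black_list)
--     kept = [x for x in item_list if x not in banned]
--     item_list[:] = kept
--     return item_list
-- ===== Notes on version B (the rewrite author's own statement) =====
-- stated objective: faster
-- what changed: Replaces the per-blacklist-value repeated remove() scans with a single forward filtering pass over item_list against a set of the blacklist, assigned back in place to preserve the mutation.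
import Mathlib
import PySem

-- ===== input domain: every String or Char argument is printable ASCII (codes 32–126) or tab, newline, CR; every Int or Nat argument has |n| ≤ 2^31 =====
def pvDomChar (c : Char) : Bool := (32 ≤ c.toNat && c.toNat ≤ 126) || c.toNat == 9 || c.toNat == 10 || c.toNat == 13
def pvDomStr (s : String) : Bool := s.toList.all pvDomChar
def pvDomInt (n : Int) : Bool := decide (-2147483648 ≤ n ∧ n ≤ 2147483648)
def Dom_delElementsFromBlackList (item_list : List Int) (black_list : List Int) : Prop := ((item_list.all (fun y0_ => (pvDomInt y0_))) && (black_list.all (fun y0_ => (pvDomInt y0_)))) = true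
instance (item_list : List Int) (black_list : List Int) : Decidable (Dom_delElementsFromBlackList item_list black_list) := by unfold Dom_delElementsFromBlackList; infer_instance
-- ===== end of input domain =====

-- B rewrites A's repeated per-blacklist-value remove() scans as one in-place filtering pass over item_list (faster; return-value equivalence proved; both mutate item_list in Python).

-- ===== PORT A =====
-- inner 'while 1==1: try: n.remove(x) except: break' — remove x until ValueError
def pvRemoveAll (n : List Int) (x : Int) : List Int :=
  match h : PySem.List.remove? n x with
  | none => n
  | some m => pvRemoveAll m x
termination_by n.length
decreasing_by
  have hx : x ∈ n := by
    by_contra hc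
    rw [(PySem.List.remove?_eq_none_iff (xs := n) (v := x)).mpr hc] at h
    simp at h
  have := PySem.List.remove?_eq_some_erase (xs := n) (v := x) hx
  rw [this] at h
  cases h
  have := List.length_erase_add_one hx
  omega

def delElementsFromBlackList (item_list : List Int) (black_list : List Int) : List Int :=
  black_list.foldl (fun n x => pvRemoveAll n x) item_list

-- ===== PORT B =====
-- banned = set(black_list); kept = [x for x in item_list if x not in banned]; item_list[:] = kept; return item_list
def delElementsFromBlackList_alt (item_list : List Int) (black_list : List Int) : List Int :=
  let banned := PySem.Set.ofList black_list
  item_list.filter (fun x => !(PySem.Set.contains banned x))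

-- ===== PRECONDITION & SPEC =====
def Spec_delElementsFromBlackList (item_list : List Int) (black_list : List Int) (out : List Int) : Prop := out = delElementsFromBlackList_alt item_list black_list
instance (item_list : List Int) (black_list : List Int) (out : List Int) : Decidable (Spec_delElementsFromBlackList item_list black_list out) := by unfold Spec_delElementsFromBlackList; infer_instance

-- ===== CLAIM (what is proved, stated in full; the proofs are below) =====
def Claim_equal_delElementsFromBlackList : Prop := ∀ (item_list : List Int) (black_list : List Int), Dom_delElementsFromBlackList item_list black_list → Spec_delElementsFromBlackList item_list black_list (delElementsFromBlackList item_list black_list)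

-- ===== LEMMAS AND PROOFS =====
theorem pvRemoveAll_of_none (n : List Int) (x : Int) (h : PySem.List.remove? n x = none) :
    pvRemoveAll n x = n := by
  rw [pvRemoveAll]
  split
  · rfl
  · next h' => rw [h] at h'; simp at h'

theorem pvRemoveAll_of_some (n m : List Int) (x : Int) (h : PySem.List.remove? n x = some m) :
    pvRemoveAll n x = pvRemoveAll m x := by
  rw [pvRemoveAll]
  split
  · next h' => rw [h] at h'; simp at h'
  · next m' h' => rw [h] at h'; cases h'; rfl

theorem filter_ne_erase (n : List Int) (x : Int) :
    (n.erase x).filter (fun a => a != x) = n.filter (fun a => a != x) := by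
  induction n with
  | nil => rfl
  | cons a t ih =>
    by_cases hax : a = x
    · subst hax
      simp [List.filter]
    · rw [List.erase_cons_tail (by simpa using hax)]
      simp [List.filter, ih]

theorem pvRemoveAll_eq_filter (n : List Int) (x : Int) :
    pvRemoveAll n x = n.filter (fun a => a != x) := by
  induction n using pvRemoveAll.induct x with
  | case1 n h =>
    have hx : x ∉ n := (PySem.List.remove?_eq_none_iff (xs := n) (v := x)).mp h
    rw [pvRemoveAll_of_none n x h]
    refine (List.filter_eq_self.mpr ?_).symm
    intro a ha
    simp only [bne_iff_ne, ne_eq]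
    exact fun hax => hx (hax ▸ ha)
  | case2 n m h ih =>
    have hx : x ∈ n := by
      by_contra hc
      rw [(PySem.List.remove?_eq_none_iff (xs := n) (v := x)).mpr hc] at h
      simp at h
    have he := PySem.List.remove?_eq_some_erase (xs := n) (v := x) hx
    rw [he] at h
    cases h
    rw [pvRemoveAll_of_some n (n.erase x) x he, ih, filter_ne_erase]

theorem foldl_removeAll_eq_filter (black_list n : List Int) :
    black_list.foldl (fun n x => pvRemoveAll n x) n
      = n.filter (fun a => !black_list.contains a) := by
  induction black_list generalizing n with
  | nil => simp
  | cons x t ih =>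
    rw [List.foldl_cons, ih, pvRemoveAll_eq_filter, List.filter_filter]
    apply List.filter_congr
    intro a _
    by_cases hax : a = x <;> simp [hax]

-- ===== VERDICT (by name: the statement is the Claim_ definition above) =====
theorem delElementsFromBlackList_spec : Claim_equal_delElementsFromBlackList := by
  intro il bl _
  show _ = _
  rw [delElementsFromBlackList, delElementsFromBlackList_alt, foldl_removeAll_eq_filter]
  apply List.filter_congr
  intro a _
  simp [PySem.Set.contains, PySem.Set.mem_ofList]
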